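-- pv_equiv track=rewrite | github.com/daniel-reich/turbo-robot | 2jcxK7gpn6Z474kjz_20.py | security
-- ===== SOURCE A (Python) =====
-- def security(txt):
--     theif = False
--     money = False
--     for letter in txt:
--         if letter == "T" and money:
--             return "ALARM!"
--         elif letter == "T":
--             theif = True
--         elif letter == "G":
--             money = False
--             theif = False
--         elif letter == "$" and theif:
--             return "ALARM!"
--         elif letter == "$":
--             money = True
--     return "Safe"
-- ===== SOURCE B (Python) =====
-- def security(txt):
--     for seg in txt.split("G"):
--         if "T" in seg and "$" in seg:
--             return "ALARM!"
--     return "Safe"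
-- ===== Notes on version B (the rewrite author's own statement) =====
-- stated objective: simpler
-- what changed: Replaces A's per-character state machine with two boolean flags and early returns by splitting the text at the guard/reset character and testing whether any resulting segment contains both the thief and the money characters.
import Mathlib
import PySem

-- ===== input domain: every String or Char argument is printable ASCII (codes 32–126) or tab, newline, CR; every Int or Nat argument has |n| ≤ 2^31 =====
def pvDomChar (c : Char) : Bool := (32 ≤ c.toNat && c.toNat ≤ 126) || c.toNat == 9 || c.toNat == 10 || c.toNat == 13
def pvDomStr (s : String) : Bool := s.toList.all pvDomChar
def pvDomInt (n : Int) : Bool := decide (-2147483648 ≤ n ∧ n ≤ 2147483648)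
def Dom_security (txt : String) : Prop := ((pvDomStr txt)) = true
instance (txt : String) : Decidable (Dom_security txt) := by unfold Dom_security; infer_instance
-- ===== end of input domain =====

-- B replaces A's per-character two-flag state machine by splitting on the reset
-- character 'G' and testing each segment for containing both 'T' and '$' (simpler).

-- ===== PORT A =====
-- the per-character loop with its two boolean flags and early returns, transliterated
def secLoop : List Char → Bool → Bool → String
  | [], _, _ => "Safe"
  | c :: rest, theif, money =>
    if c = 'T' ∧ money = true then "ALARM!"
    else if c = 'T' then secLoop rest true money
    else if c = 'G' then secLoop rest false false
    else if c = '$' ∧ theif = true then "ALARM!"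
    else if c = '$' then secLoop rest theif true
    else secLoop rest theif money

def security (txt : String) : String := secLoop txt.toList false false

-- ===== PORT B =====
-- "T" in seg and "$" in seg  (single-character membership)
def segAlarm (seg : List Char) : Bool := seg.contains 'T' && seg.contains '$'

-- txt.split("G") ported as List.splitOn 'G' (exact for a one-character separator)
def security_alt (txt : String) : String :=
  if (txt.toList.splitOn 'G').any segAlarm then "ALARM!" else "Safe"

-- ===== PRECONDITION & SPEC =====
def Spec_security (txt : String) (out : String) : Prop := out = security_alt txt
instance (txt : String) (out : String) : Decidable (Spec_security txt out) := by unfold Spec_security; infer_instance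

-- ===== CLAIM (what is proved, stated in full; the proofs are below) =====
def Claim_equal_security : Prop := ∀ (txt : String), Dom_security txt → Spec_security txt (security txt)

-- ===== LEMMAS AND PROOFS =====

-- splitOn on a cons, specialised from splitOnP
theorem splitOn_char_cons (a c : Char) (cs : List Char) :
    (c :: cs).splitOn a = if c = a then [] :: cs.splitOn a
      else (cs.splitOn a).modifyHead (c :: ·) := by
  simp only [List.splitOn, List.splitOnP_cons, beq_iff_eq]

theorem splitOn_ne_nil (a : Char) (cs : List Char) : cs.splitOn a ≠ [] := by
  induction cs with
  | nil => simp [List.splitOn]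
  | cons c cs ih =>
    rw [splitOn_char_cons]
    split
    · simp
    · cases h : cs.splitOn a with
      | nil => exact absurd h ih
      | cons s ss => simp

-- the running state of A's loop, expressed on the split of the remaining input
def Q (cs : List Char) (t m : Bool) : Bool :=
  ((((cs.splitOn 'G').headD []).contains 'T' || t)
    && (((cs.splitOn 'G').headD []).contains '$' || m))
  || ((cs.splitOn 'G').tail).any segAlarm

theorem secLoop_eq_Q (cs : List Char) (t m : Bool) (h : (t && m) = false) :
    secLoop cs t m = if Q cs t m then "ALARM!" else "Safe" := by
  induction cs generalizing t m with
  | nil =>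
    simp only [secLoop, Q, List.splitOn, List.splitOnP_nil]
    simp
    intro ht; rw [ht] at h; simp at h; simp [h]
  | cons c cs ih =>
    obtain ⟨s, ss, hsp⟩ : ∃ s ss, cs.splitOn 'G' = s :: ss := by
      cases hx : cs.splitOn 'G' with
      | nil => exact absurd hx (splitOn_ne_nil _ _)
      | cons s ss => exact ⟨s, ss, rfl⟩
    by_cases hT : c = 'T'
    · subst hT
      by_cases hm : m = true
      · subst hm
        have hq : Q ('T' :: cs) t true = true := by
          simp [Q, splitOn_char_cons, hsp, List.headD]
        simp [secLoop, hq]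
      · have hm' : m = false := by cases m <;> simp_all
        subst hm'
        rw [show secLoop ('T' :: cs) t false = secLoop cs true false by
          simp [secLoop]]
        rw [ih true false (by simp)]
        congr 1
        simp [Q, splitOn_char_cons, hsp, List.headD]
    · by_cases hG : c = 'G'
      · subst hG
        rw [show secLoop ('G' :: cs) t m = secLoop cs false false by
          simp [secLoop, hT]]
        rw [ih false false (by simp)]
        congr 1
        simp only [Q, splitOn_char_cons, hsp, List.headD]
        simp [segAlarm]
        intro ht; rw [ht] at h; simp at h; simp [h]
      · by_cases hD : c = '$'
        · subst hD
          by_cases ht : t = true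
          · subst ht
            have hq : Q ('$' :: cs) true m = true := by
              simp [Q, splitOn_char_cons, hsp, List.headD]
            rw [show secLoop ('$' :: cs) true m = "ALARM!" by
              simp [secLoop]]
            simp [hq]
          · have ht' : t = false := by cases t <;> simp_all
            subst ht'
            rw [show secLoop ('$' :: cs) false m = secLoop cs false true by
              simp [secLoop]]
            rw [ih false true (by simp)]
            congr 1
            simp [Q, splitOn_char_cons, hsp, List.headD]
        · rw [show secLoop (c :: cs) t m = secLoop cs t m by
            simp [secLoop, hT, hG, hD]]
          rw [ih t m h]
          congr 1
          simp only [Q, splitOn_char_cons, hsp, if_neg hG, List.headD]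
          simp [Ne.symm hT, Ne.symm hD]

-- ===== VERDICT (by name: the statement is the Claim_ definition above) =====
theorem security_spec : Claim_equal_security := by
  intro txt _
  unfold Spec_security security security_alt
  rw [secLoop_eq_Q _ false false (by simp)]
  obtain ⟨s, ss, hsp⟩ : ∃ s ss, txt.toList.splitOn 'G' = s :: ss := by
    cases hx : txt.toList.splitOn 'G' with
    | nil => exact absurd hx (splitOn_ne_nil _ _)
    | cons s ss => exact ⟨s, ss, rfl⟩
  simp [Q, hsp, segAlarm, List.headD]
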